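-- pv_equiv track=rewrite | github.com/alvarolopez/egi-certool | test_SITE.py | filter_and_join_ldap
-- ===== SOURCE A (Python) =====
-- def filter_and_join_ldap(data, query):
--     """Filter results to only those of query and join line breaks from ldapsearch."""
--     got = False
--     aux = []
--     for i in data.splitlines():
--         if i.startswith(query):
--             got = True
--             aux.append([i.split(":",1)[-1].strip()])
--         elif i.startswith(" ") and got:
--             aux[-1].append(i.strip())
--         elif got:
--             got = False
--     return ["".join(i) for i in aux]
-- ===== SOURCE B (Python) =====
-- def filter_and_join_ldap(data, query):
--     """Filter results to only those of query and join line breaks from ldapsearch."""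
--     lines = data.splitlines()
--     n = len(lines)
--     out = []
--     i = 0
--     while i < n:
--         line = lines[i]
--         i += 1
--         if line.startswith(query):
--             pieces = [line.split(":", 1)[-1].strip()]
--             while i < n and lines[i].startswith(" ") and not lines[i].startswith(query):
--                 pieces.append(lines[i].strip())
--                 i += 1
--             out.append("".join(pieces))
--     return out
-- ===== Notes on version B (the rewrite author's own statement) =====
-- stated objective: simpler
-- what changed: Replaces A's got-flag state machine (append-to-last-entry fold plus a final join pass) with a single index walk that, at each query match, consumes the run of continuation lines with an inner loop and emits the joined entry immediately.
import Mathlib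
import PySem

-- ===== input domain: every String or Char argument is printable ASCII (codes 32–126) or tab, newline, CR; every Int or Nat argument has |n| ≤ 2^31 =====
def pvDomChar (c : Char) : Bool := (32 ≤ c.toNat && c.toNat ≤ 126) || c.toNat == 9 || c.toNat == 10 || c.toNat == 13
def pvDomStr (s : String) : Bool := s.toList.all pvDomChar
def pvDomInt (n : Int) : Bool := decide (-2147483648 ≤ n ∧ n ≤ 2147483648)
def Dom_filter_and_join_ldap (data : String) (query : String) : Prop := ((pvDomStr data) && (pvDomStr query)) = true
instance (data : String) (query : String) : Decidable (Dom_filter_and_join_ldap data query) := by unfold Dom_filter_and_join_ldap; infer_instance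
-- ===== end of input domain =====

-- B replaces A's got-flag state machine over a fold by a single index walk that, at each
-- query match, consumes the following continuation lines with an inner loop (objective: simpler).

-- ===== PORT A =====
-- `i.split(":", 1)[-1].strip()`: split with a nonempty separator always returns a
-- nonempty list, so `[-1]` is its last element; the `getD` defaults are unreachable.
def pvLastPiece (i : String) : String :=
  PySem.Str.strip ((PySem.List.pyGet? ((PySem.Str.splitMax? i ":" 1).getD []) (-1)).getD "")

-- A's loop body; state = (got, aux).  `aux` is kept in reverse order and each entry's
-- pieces in reverse order (Lean lists cons at the front), undone once at the end.
-- The `[]` case of the middle branch is Python's `aux[-1]` with empty `aux`: unreachable,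
-- since `got = true` is only ever set together with an append to `aux`.
def pvStepA (query : String) (st : Bool × List (List String)) (i : String) :
    Bool × List (List String) :=
  if PySem.Str.startswith i query then
    (true, [pvLastPiece i] :: st.2)
  else if PySem.Str.startswith i " " && st.1 then
    (st.1, match st.2 with
           | h :: t => (PySem.Str.strip i :: h) :: t
           | [] => [])
  else if st.1 then (false, st.2) else st

def filter_and_join_ldap (data : String) (query : String) : List String :=
  let st := (PySem.Str.splitlines data).foldl (pvStepA query) (false, [])
  (st.2.map (fun ps => PySem.Str.join "" ps.reverse)).reverse

-- ===== PORT B =====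
-- the inner while-loop's condition: a continuation line (and not a fresh query match)
def pvContP (query : String) (x : String) : Bool :=
  PySem.Str.startswith x " " && !(PySem.Str.startswith x query)

-- B's index walk: on a query match, consume the run of continuation lines
-- (inner while-loop = takeWhile/dropWhile on the remaining lines) and emit the joined entry.
def pvGoB (query : String) : List String → List String
  | [] => []
  | l :: rest =>
    if PySem.Str.startswith l query then
      PySem.Str.join "" (pvLastPiece l :: (rest.takeWhile (pvContP query)).map PySem.Str.strip)
        :: pvGoB query (rest.dropWhile (pvContP query))
    else pvGoB query rest
  termination_by lines => lines.length
  decreasing_by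
    · have := List.length_dropWhile_le (pvContP query) rest
      simp only [List.length_cons]; omega
    · simp

def filter_and_join_ldap_alt (data : String) (query : String) : List String :=
  pvGoB query (PySem.Str.splitlines data)

-- ===== PRECONDITION & SPEC =====
def Spec_filter_and_join_ldap (data : String) (query : String) (out : List String) : Prop := out = filter_and_join_ldap_alt data query
instance (data : String) (query : String) (out : List String) : Decidable (Spec_filter_and_join_ldap data query out) := by unfold Spec_filter_and_join_ldap; infer_instance

-- ===== CLAIM (what is proved, stated in full; the proofs are below) =====
def Claim_equal_filter_and_join_ldap : Prop := ∀ (data : String) (query : String), Dom_filter_and_join_ldap data query → Spec_filter_and_join_ldap data query (filter_and_join_ldap data query)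

-- ===== LEMMAS AND PROOFS =====
-- rendering of one reversed entry of A's state
def pvRender (ps : List String) : String := PySem.Str.join "" ps.reverse

-- A's result when the loop is started in state `st` on the remaining `lines`
def pvOut (query : String) (st : Bool × List (List String)) (lines : List String) :
    List String :=
  ((lines.foldl (pvStepA query) st).2.map pvRender).reverse

-- Main invariant, by strong induction on the number of remaining lines:
-- (1) from a `got = false` state A's remaining output is the rendered accumulator
--     followed by B's walk over the same lines;
-- (2) from a `got = true` state with open entry `e`, the leading continuation run
--     is folded into `e` and the rest is again B's walk.
theorem pv_main (query : String) : ∀ (n : ℕ) (lines : List String), lines.length ≤ n →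
    (∀ acc, pvOut query (false, acc) lines = (acc.map pvRender).reverse ++ pvGoB query lines)
  ∧ (∀ e acc, pvOut query (true, e :: acc) lines =
      (acc.map pvRender).reverse ++
        pvRender (((lines.takeWhile (pvContP query)).map PySem.Str.strip).reverse ++ e)
          :: pvGoB query (lines.dropWhile (pvContP query))) := by
  intro n
  induction n with
  | zero =>
    intro lines h
    have : lines = [] := List.eq_nil_of_length_eq_zero (Nat.le_zero.mp h)
    subst this
    constructor
    · intro acc; simp [pvOut, pvGoB]
    · intro e acc; simp [pvOut, pvGoB, pvRender]
  | succ n ih =>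
    intro lines h
    match lines with
    | [] =>
      constructor
      · intro acc; simp [pvOut, pvGoB]
      · intro e acc; simp [pvOut, pvGoB, pvRender]
    | l :: rest =>
      have hr : rest.length ≤ n := by simpa using Nat.lt_succ_iff.mp (Nat.lt_of_lt_of_le (by simp) h)
      constructor
      · intro acc
        by_cases hq : PySem.Chars.startswith l.toList query.toList = true
        · have := (ih rest hr).2 [pvLastPiece l] acc
          simp only [pvOut, List.foldl_cons, pvStepA, PySem.Str.startswith_eq, hq, if_pos] at this ⊢
          rw [this, pvGoB]
          simp [hq, pvRender]
        · have := (ih rest hr).1 acc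
          simp only [pvOut, List.foldl_cons, pvStepA, PySem.Str.startswith_eq, hq, Bool.and_false, if_neg,
            Bool.false_eq_true, if_false] at this ⊢
          rw [this, pvGoB]
          simp [hq]
      · intro e acc
        by_cases hq : PySem.Chars.startswith l.toList query.toList = true
        · have hP : pvContP query l = false := by simp [pvContP, hq]
          have := (ih rest hr).2 [pvLastPiece l] (e :: acc)
          simp only [pvOut, List.foldl_cons, pvStepA, PySem.Str.startswith_eq, hq, if_pos] at this ⊢
          rw [this, List.takeWhile_cons_of_neg (by simp [hP]),
            List.dropWhile_cons_of_neg (by simp [hP]), pvGoB]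
          simp [hq, pvRender]
        · by_cases hs : PySem.Chars.startswith l.toList " ".toList = true
          · have hs' : PySem.Chars.startswith l.toList [' '] = true := by simpa using hs
            have hP : pvContP query l = true := by simp [pvContP, hq, hs']
            have := (ih rest hr).2 (PySem.Str.strip l :: e) acc
            simp only [pvOut, List.foldl_cons, pvStepA, PySem.Str.startswith_eq, hq, hs, Bool.true_and, if_neg,
              Bool.false_eq_true, if_false, if_true, if_pos] at this ⊢
            rw [this, List.takeWhile_cons_of_pos (by simp [hP]),
              List.dropWhile_cons_of_pos (by simp [hP])]
            simp
          · have hs' : ¬ PySem.Chars.startswith l.toList [' '] = true := by simpa using hs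
            have hP : pvContP query l = false := by simp [pvContP, hs']
            have := (ih rest hr).1 (e :: acc)
            simp only [pvOut, List.foldl_cons, pvStepA, PySem.Str.startswith_eq, hq, hs, Bool.false_and, if_neg,
              Bool.false_eq_true, if_false, if_true] at this ⊢
            rw [this, List.takeWhile_cons_of_neg (by simp [hP]),
              List.dropWhile_cons_of_neg (by simp [hP]), pvGoB]
            simp [hq, pvRender]

-- ===== VERDICT (by name: the statement is the Claim_ definition above) =====
theorem filter_and_join_ldap_spec : Claim_equal_filter_and_join_ldap := by
  intro data query _
  unfold Spec_filter_and_join_ldap filter_and_join_ldap filter_and_join_ldap_alt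
  have := (pv_main query (PySem.Str.splitlines data).length (PySem.Str.splitlines data)
    le_rfl).1 []
  simpa [pvOut, pvRender] using this
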